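-- pv_equiv track=rewrite | github.com/pypi-data/pypi-mirror-397 | packages/ascend-deployer/ascend_deployer-7.2rc1-py3-none-any.whl/ascend_deployer/scripts/k8s_rep.py | update_missing_pods
-- ===== SOURCE A (Python) =====
-- def update_missing_pods(info, require_list):
--     already_pods = info.get("ready pods", [])
--     missing_pods = info.get("missing pods", [])
--     for require_pod in require_list:
--         flag = False
--         for ready_pod in already_pods:
--             if ready_pod.startswith(require_pod):
--                 flag = True
--                 break
--         if not flag:
--             missing_pods.append(require_pod)
--             info["missing pods"] = missing_pods
--     return info
-- ===== SOURCE B (Python) =====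
-- def update_missing_pods(info, require_list):
--     already_pods = info.get("ready pods", [])
--     # index every prefix of every ready pod once, then test each require_pod in O(1)
--     prefixes = set()
--     for ready in already_pods:
--         for k in range(len(ready) + 1):
--             prefixes.add(ready[:k])
--     new_missing = [p for p in require_list if p not in prefixes]
--     if new_missing:
--         info["missing pods"] = info.get("missing pods", []) + new_missing
--     return info
-- ===== Notes on version B (the rewrite author's own statement) =====
-- stated objective: alternative
-- what changed: B precomputes a hash set of all prefixes of the ready pods once, so the per-require_pod inner scan over ready pods disappears (one O(1) set lookup each); the missing list is built in one comprehension and the dict key written once instead of on every append.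
import Mathlib
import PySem

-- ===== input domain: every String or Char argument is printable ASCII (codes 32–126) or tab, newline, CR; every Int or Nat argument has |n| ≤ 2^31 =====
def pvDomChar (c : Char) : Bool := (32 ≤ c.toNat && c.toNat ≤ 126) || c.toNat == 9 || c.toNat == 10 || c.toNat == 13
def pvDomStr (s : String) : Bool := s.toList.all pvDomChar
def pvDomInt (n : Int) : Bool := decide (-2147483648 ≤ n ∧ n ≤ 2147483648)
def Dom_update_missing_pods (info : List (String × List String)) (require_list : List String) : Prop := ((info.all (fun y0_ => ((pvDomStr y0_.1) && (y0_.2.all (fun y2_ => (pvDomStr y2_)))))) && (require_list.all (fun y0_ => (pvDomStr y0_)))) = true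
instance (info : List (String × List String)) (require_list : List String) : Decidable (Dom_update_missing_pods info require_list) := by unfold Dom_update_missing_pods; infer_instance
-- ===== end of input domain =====

-- B replaces A's per-require_pod scan over ready pods by one precomputed set of all ready-pod
-- prefixes (a single set lookup per require_pod) and writes the "missing pods" key once, not per
-- append. A mutates info (and its "missing pods" list) in place while B assigns the key once;
-- the theorem is about the returned value, which is the same.

-- ===== PORT A =====
def update_missing_pods (info : List (String × List String)) (require_list : List String) : List (String × List String) :=
  let d := PySem.Dict.mk info
  let already_pods := d.getD "ready pods" []
  let missing_pods := d.getD "missing pods" []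
  -- for require_pod in require_list: flag = inner break-loop over already_pods; if not flag: append + assign
  let st := require_list.foldl
    (fun (st : List String × PySem.Dict String (List String)) require_pod =>
      let flag := already_pods.any (fun ready_pod => PySem.Str.startswith ready_pod require_pod)
      if flag then st
      else
        let m := st.1 ++ [require_pod]
        (m, st.2.insert "missing pods" m))
    (missing_pods, d)
  st.2.items

-- ===== PORT B =====
def update_missing_pods_alt (info : List (String × List String)) (require_list : List String) : List (String × List String) :=
  let d := PySem.Dict.mk info
  let already_pods := d.getD "ready pods" []
  -- prefixes = set(); for ready in already_pods: for k in range(len(ready)+1): prefixes.add(ready[:k])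
  let prefixes : PySem.Set String := already_pods.foldl
    (fun s ready =>
      (PySem.List.pyRange 0 (PySem.Str.len ready + 1) 1).foldl
        (fun s k => PySem.Set.add s (PySem.Str.slice ready none (some k))) s)
    PySem.Set.empty
  let new_missing := require_list.filter (fun p => !(PySem.Set.contains prefixes p))
  if new_missing.isEmpty then d.items
  else (d.insert "missing pods" (d.getD "missing pods" [] ++ new_missing)).items

-- ===== PRECONDITION & SPEC =====
def Spec_update_missing_pods (info : List (String × List String)) (require_list : List String) (out : List (String × List String)) : Prop := out = update_missing_pods_alt info require_list
instance (info : List (String × List String)) (require_list : List String) (out : List (String × List String)) : Decidable (Spec_update_missing_pods info require_list out) := by unfold Spec_update_missing_pods; infer_instance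

-- ===== CLAIM (what is proved, stated in full; the proofs are below) =====
def Claim_equal_update_missing_pods : Prop := ∀ (info : List (String × List String)) (require_list : List String), Dom_update_missing_pods info require_list → Spec_update_missing_pods info require_list (update_missing_pods info require_list)

-- ===== LEMMAS AND PROOFS =====

-- A's loop body, named so the loop can be characterised by induction
def stepA (already : List String) (st : List String × PySem.Dict String (List String))
    (p : String) : List String × PySem.Dict String (List String) :=
  if already.any (fun r => PySem.Str.startswith r p) then st
  else (st.1 ++ [p], st.2.insert "missing pods" (st.1 ++ [p]))

-- overwriting the same key twice keeps only the second value
theorem dict_insert_insert (d : PySem.Dict String (List String)) (k : String)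
    (v w : List String) : (d.insert k v).insert k w = d.insert k w := by
  apply PySem.Dict.ext
  rw [PySem.Dict.items_insert, PySem.Dict.items_insert, PySem.Dict.items_insert]
  by_cases h : d.contains k = true
  · simp only [h, if_true, PySem.Dict.contains_insert_self, List.map_map]
    refine List.map_congr_left ?_
    intro a _
    by_cases ha : (a.1 == k) = true
    · simp [Function.comp, ha]
    · simp [Function.comp, ha]
  · simp only [h, Bool.false_eq_true, if_false, PySem.Dict.contains_insert_self, if_true,
      List.map_append]
    have hk : ∀ a ∈ d.items, (a.1 == k) = false := by
      intro a ha
      by_contra hc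
      exact h (List.any_eq_true.mpr ⟨a, ha, by simpa using hc⟩)
    have hmap : List.map (fun p => if (p.1 == k) = true then (k, w) else p) d.items = d.items := by
      calc List.map (fun p => if (p.1 == k) = true then (k, w) else p) d.items
          = List.map id d.items := List.map_congr_left (by intro a ha; simp [hk a ha])
        _ = d.items := List.map_id d.items
    rw [hmap]
    simp

-- A's loop, characterised: it appends the not-covered pods and writes the key iff any was appended
theorem loopA_char (already : List String) (l : List String) (m : List String)
    (d : PySem.Dict String (List String)) :
    l.foldl (stepA already) (m, d) =
    (m ++ l.filter (fun p => !(already.any (fun r => PySem.Str.startswith r p))),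
     if (l.filter (fun p => !(already.any (fun r => PySem.Str.startswith r p)))).isEmpty
       then d
       else d.insert "missing pods"
         (m ++ l.filter (fun p => !(already.any (fun r => PySem.Str.startswith r p))))) := by
  induction l generalizing m d with
  | nil => simp
  | cons p l ih =>
    by_cases h : (already.any fun r => PySem.Str.startswith r p) = true
    · rw [List.foldl_cons, show stepA already (m, d) p = (m, d) by simp only [stepA, h, if_true],
        ih, List.filter_cons_of_neg (by simp only [h, Bool.not_true]; exact Bool.false_ne_true)]
    · rw [List.foldl_cons,
        show stepA already (m, d) p
           = (m ++ [p], d.insert "missing pods" (m ++ [p])) by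
          simp only [stepA, h, Bool.false_eq_true, if_false],
        ih, List.filter_cons_of_pos
          (by simp only [Bool.eq_false_iff.mpr h, Bool.not_false])]
      rw [dict_insert_insert]
      by_cases he : (l.filter (fun p => !(already.any (fun r => PySem.Str.startswith r p)))).isEmpty = true
      · rw [List.isEmpty_iff.mp he]
        simp
      · rw [if_neg he]
        simp [List.append_assoc]

-- a require_pod is in B's prefix set iff some ready pod starts with it (A's inner loop)
theorem mem_prefixes (already : List String) (p : String) :
    (p ∈ already.foldl
      (fun s ready =>
        (PySem.List.pyRange 0 (PySem.Str.len ready + 1) 1).foldl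
          (fun s k => PySem.Set.add s (PySem.Str.slice ready none (some k))) s)
      PySem.Set.empty) ↔
    already.any (fun r => PySem.Str.startswith r p) = true := by
  have main : ∀ (s : PySem.Set String),
      (p ∈ already.foldl
        (fun s ready =>
          (PySem.List.pyRange 0 (PySem.Str.len ready + 1) 1).foldl
            (fun s k => PySem.Set.add s (PySem.Str.slice ready none (some k))) s)
        s) ↔
      p ∈ s ∨ ∃ r ∈ already, ∃ k ∈ PySem.List.pyRange 0 (PySem.Str.len r + 1) 1,
        p = PySem.Str.slice r none (some k) := by
    induction already with
    | nil => simp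
    | cons r rest ih =>
      intro s
      rw [List.foldl_cons, ih, PySem.Set.mem_foldl_add]
      constructor
      · rintro (⟨hs | ⟨k, hk, he⟩⟩ | ⟨r', hr', hrest⟩)
        · exact Or.inl hs
        · exact Or.inr ⟨r, by simp, k, hk, he⟩
        · exact Or.inr ⟨r', by simp [hr'], hrest⟩
      · rintro (hs | ⟨r', hr', k, hk, he⟩)
        · exact Or.inl (Or.inl hs)
        · rcases List.mem_cons.mp hr' with hh | hh
          · subst hh; exact Or.inl (Or.inr ⟨k, hk, he⟩)
          · exact Or.inr ⟨r', hh, k, hk, he⟩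
  rw [main PySem.Set.empty]
  simp only [PySem.Set.empty, List.not_mem_nil, false_or, List.any_eq_true]
  constructor
  · rintro ⟨r, hr, k, hk, he⟩
    refine ⟨r, hr, ?_⟩
    rw [PySem.Str.startswith_eq, PySem.Chars.startswith_iff]
    rw [PySem.List.mem_pyRange_one, PySem.Str.len_eq] at hk
    have hp : p.toList = r.toList.take k.toNat := by
      rw [he, PySem.Str.toList_slice, PySem.Chars.slice_eq_listSlice, PySem.List.slice_to _ hk.1]
    rw [hp]
    exact List.take_prefix _ _
  · rintro ⟨r, hr, hsw⟩
    rw [PySem.Str.startswith_eq, PySem.Chars.startswith_iff] at hsw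
    refine ⟨r, hr, (p.toList.length : Int), ?_, ?_⟩
    · rw [PySem.List.mem_pyRange_one, PySem.Str.len_eq]
      have := hsw.length_le
      omega
    · apply String.toList_inj.mp
      rw [PySem.Str.toList_slice, PySem.Chars.slice_eq_listSlice,
        PySem.List.slice_to _ (Int.natCast_nonneg _)]
      simpa using List.prefix_iff_eq_take.mp hsw

-- ===== VERDICT (by name: the statement is the Claim_ definition above) =====
theorem update_missing_pods_spec : Claim_equal_update_missing_pods := by
  intro info require_list _
  show update_missing_pods info require_list = update_missing_pods_alt info require_list
  have hA : update_missing_pods info require_list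
      = (require_list.foldl (stepA ((PySem.Dict.mk info).getD "ready pods" []))
          ((PySem.Dict.mk info).getD "missing pods" [], PySem.Dict.mk info)).2.items := rfl
  have hB : update_missing_pods_alt info require_list
      = (if (require_list.filter (fun p => !(PySem.Set.contains
            ((((PySem.Dict.mk info).getD "ready pods" [] : List String).foldl
              (fun s ready =>
                (PySem.List.pyRange 0 (PySem.Str.len ready + 1) 1).foldl
                  (fun s k => PySem.Set.add s (PySem.Str.slice ready none (some k))) s)
              PySem.Set.empty)) p))).isEmpty
         then (PySem.Dict.mk info).items
         else ((PySem.Dict.mk info).insert "missing pods"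
            ((PySem.Dict.mk info).getD "missing pods" [] ++
              require_list.filter (fun p => !(PySem.Set.contains
                ((((PySem.Dict.mk info).getD "ready pods" [] : List String).foldl
                  (fun s ready =>
                    (PySem.List.pyRange 0 (PySem.Str.len ready + 1) 1).foldl
                      (fun s k => PySem.Set.add s (PySem.Str.slice ready none (some k))) s)
                  PySem.Set.empty)) p)))).items) := rfl
  have hfilter : require_list.filter (fun p => !(PySem.Set.contains
        ((((PySem.Dict.mk info).getD "ready pods" [] : List String).foldl
          (fun s ready =>
            (PySem.List.pyRange 0 (PySem.Str.len ready + 1) 1).foldl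
              (fun s k => PySem.Set.add s (PySem.Str.slice ready none (some k))) s)
          PySem.Set.empty)) p))
      = require_list.filter (fun p => !(((PySem.Dict.mk info).getD "ready pods" [] : List String).any
          (fun r => PySem.Str.startswith r p))) := by
    refine List.filter_congr ?_
    intro p _
    congr 1
    rw [Bool.eq_iff_iff, PySem.Set.contains_iff, mem_prefixes]
  rw [hA, loopA_char, hB, hfilter]
  by_cases he : ((require_list.filter (fun p => !(((PySem.Dict.mk info).getD "ready pods" [] : List String).any
      (fun r => PySem.Str.startswith r p)))).isEmpty) = true
  · rw [if_pos he, if_pos he]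
  · rw [if_neg he, if_neg he]
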